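-- pv_equiv track=rewrite | github.com/JotaVeUltra/subsequencia-crescente-maxima | crescente.py | guloso
-- ===== SOURCE A (Python) =====
-- def guloso(sequencia):
--     subsequencia = []
--     ultimo_valor = 0  # somente sequências com valores positivo e não nulos
--     for valor in sequencia:
--         if valor > ultimo_valor:
--             ultimo_valor = valor
--             subsequencia.append(valor)
--     return subsequencia
-- ===== SOURCE B (Python) =====
-- def guloso(sequencia):
--     # Two-phase: build prefix-maximum table (floored at 0), then select values
--     # strictly exceeding the max of everything before them.
--     n = len(sequencia)
--     pref = [0] * (n + 1)
--     for i, v in enumerate(sequencia):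
--         pref[i + 1] = pref[i] if pref[i] > v else v
--     return [v for v, m in zip(sequencia, pref) if v > m]
-- ===== Notes on version B (the rewrite author's own statement) =====
-- stated objective: alternative
-- what changed: Replaces the online accumulator (running last-kept value updated inside the selection loop) with a two-phase table computation: first a prefix-maximum table floored at 0, then a separate zip-filter pass keeping values strictly above their preceding prefix max.
import Mathlib
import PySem

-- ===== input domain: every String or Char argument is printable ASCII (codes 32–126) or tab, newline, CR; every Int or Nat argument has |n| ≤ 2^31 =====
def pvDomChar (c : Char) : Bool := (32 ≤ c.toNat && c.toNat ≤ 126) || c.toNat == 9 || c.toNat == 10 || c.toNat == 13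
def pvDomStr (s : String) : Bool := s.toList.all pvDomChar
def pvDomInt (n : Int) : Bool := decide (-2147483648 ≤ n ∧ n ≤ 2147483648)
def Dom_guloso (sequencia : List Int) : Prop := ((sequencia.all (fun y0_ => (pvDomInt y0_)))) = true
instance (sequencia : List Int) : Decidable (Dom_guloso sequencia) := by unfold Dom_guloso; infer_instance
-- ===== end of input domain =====

-- B replaces A's online accumulator with a two-phase pass (prefix-max table, then zip-filter); objective: alternative decomposition, same cost.

-- ===== PORT A =====
def guloso (sequencia : List Int) : List Int :=
  (sequencia.foldl
    (fun (st : List Int × Int) valor =>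
      if valor > st.2 then (st.1 ++ [valor], valor) else st)
    ([], 0)).1

-- ===== PORT B =====
-- prefix-maximum table (floored at the initial 0), one entry per prefix
def prefTable (acc : Int) : List Int → List Int
  | [] => [acc]
  | v :: rest => acc :: prefTable (if acc > v then acc else v) rest

def guloso_alt (sequencia : List Int) : List Int :=
  ((sequencia.zip (prefTable 0 sequencia)).filter (fun p => p.1 > p.2)).map (·.1)

-- ===== PRECONDITION & SPEC =====
def Spec_guloso (sequencia : List Int) (out : List Int) : Prop := out = guloso_alt sequencia
instance (sequencia : List Int) (out : List Int) : Decidable (Spec_guloso sequencia out) := by unfold Spec_guloso; infer_instance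

-- ===== CLAIM (what is proved, stated in full; the proofs are below) =====
def Claim_equal_guloso : Prop := ∀ (sequencia : List Int), Dom_guloso sequencia → Spec_guloso sequencia (guloso sequencia)

-- ===== LEMMAS AND PROOFS =====

-- ===== VERDICT (by name: the statement is the Claim_ definition above) =====
theorem guloso_fold_pref (s : List Int) (acc : List Int) (m : Int) :
    (s.foldl
      (fun (st : List Int × Int) valor =>
        if valor > st.2 then (st.1 ++ [valor], valor) else st)
      (acc, m)).1
    = acc ++ (((s.zip (prefTable m s)).filter (fun p => p.1 > p.2)).map (·.1)) := by
  induction s generalizing acc m with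
  | nil => simp [prefTable]
  | cons v rest ih =>
    simp only [List.foldl_cons, prefTable, List.zip_cons_cons, List.filter_cons]
    by_cases h : v > m
    · have hm : (if m > v then m else v) = v := by omega
      simp [h, hm, ih]
    · have hm : (if m > v then m else v) = m := by omega
      simp [h, hm, ih]

theorem guloso_spec : Claim_equal_guloso := by
  intro s _
  unfold Spec_guloso guloso guloso_alt
  simpa using guloso_fold_pref s [] 0
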